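-- pv_equiv track=rewrite | github.com/yashikagupta1922/ACC45DAYSOFCODE-2024 | Day6-HOSTELROOM.py | max_people_in_room
-- ===== SOURCE A (Python) =====
-- def max_people_in_room(test_cases):
--     results = []
--     for case in test_cases:
--         N, X, A = case
--         current_people = X
--         max_people = X
--
--         for change in A:
--             current_people += change
--             if current_people > max_people:
--                 max_people = current_people
--
--         results.append(max_people)
--
--     return results
-- ===== SOURCE B (Python) =====
-- def max_people_in_room(test_cases):
--     # Peak occupancy = X + (max prefix sum of A, empty prefix included).
--     # The max prefix sum is computed by a RIGHT-to-left pass using the identity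
--     # best(a :: rest) = max(0, a + best(rest)); no running occupancy is kept.
--     def best(A):
--         b = 0
--         for a in reversed(A):
--             b = max(0, a + b)
--         return b
--     return [X + best(A) for N, X, A in test_cases]
-- ===== Notes on version B (the rewrite author's own statement) =====
-- stated objective: alternative
-- what changed: Instead of a forward pass maintaining a running occupancy and a running maximum, B computes each answer as X plus the maximum prefix sum of A, obtained by a single right-to-left pass using the identity best(a::rest)=max(0,a+best(rest)); no occupancy counter is kept.
import Mathlib
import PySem

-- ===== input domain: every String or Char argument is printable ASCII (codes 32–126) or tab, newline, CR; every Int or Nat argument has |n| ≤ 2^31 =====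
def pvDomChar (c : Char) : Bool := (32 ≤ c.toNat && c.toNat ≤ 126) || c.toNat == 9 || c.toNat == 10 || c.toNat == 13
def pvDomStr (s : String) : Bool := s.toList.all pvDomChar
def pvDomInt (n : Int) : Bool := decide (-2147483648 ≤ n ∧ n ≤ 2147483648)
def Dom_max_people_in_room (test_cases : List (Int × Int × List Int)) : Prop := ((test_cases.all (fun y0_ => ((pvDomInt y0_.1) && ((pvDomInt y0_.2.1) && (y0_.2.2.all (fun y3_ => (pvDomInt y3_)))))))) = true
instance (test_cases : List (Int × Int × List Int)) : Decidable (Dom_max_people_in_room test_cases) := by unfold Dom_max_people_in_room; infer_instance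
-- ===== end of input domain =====

-- B returns X plus the max prefix sum of A, computed by a reverse pass, instead of tracking running occupancy.


-- ===== PORT A =====
-- inner loop of A: state (current_people, max_people)
def pvLoopA : List Int → Int → Int → Int
  | [], _, max_people => max_people
  | change :: rest, current_people, max_people =>
      let current_people' := current_people + change
      pvLoopA rest current_people' (if current_people' > max_people then current_people' else max_people)

def max_people_in_room : List (Int × Int × List Int) → List Int
  | [] => []
  | (_N, X, A) :: rest => pvLoopA A X X :: max_people_in_room rest

-- ===== PORT B =====
-- B's helper best(A): reverse pass, b := max(0, a + b); equals the max prefix sum of A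
def pvBest (A : List Int) : Int :=
  A.reverse.foldl (fun b a => max 0 (a + b)) 0

def max_people_in_room_alt (test_cases : List (Int × Int × List Int)) : List Int :=
  test_cases.map (fun case => case.2.1 + pvBest case.2.2)

-- ===== PRECONDITION & SPEC =====
def Spec_max_people_in_room (test_cases : List (Int × Int × List Int)) (out : List Int) : Prop := out = max_people_in_room_alt test_cases
instance (test_cases : List (Int × Int × List Int)) (out : List Int) : Decidable (Spec_max_people_in_room test_cases out) := by unfold Spec_max_people_in_room; infer_instance

-- ===== CLAIM =====
def Claim_equal_max_people_in_room : Prop := ∀ (test_cases : List (Int × Int × List Int)), Dom_max_people_in_room test_cases → Spec_max_people_in_room test_cases (max_people_in_room test_cases)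

-- ===== LEMMAS AND PROOFS =====
lemma pvBest_eq_foldr (A : List Int) :
    pvBest A = A.foldr (fun a b => max 0 (a + b)) 0 := by
  simp [pvBest, List.foldl_reverse]

lemma foldr_best_nonneg (A : List Int) :
    0 ≤ A.foldr (fun a b => max 0 (a + b)) 0 := by
  cases A with
  | nil => simp
  | cons a rest => simp [List.foldr_cons]

lemma pvLoopA_eq (A : List Int) : ∀ c m : Int, c ≤ m →
    pvLoopA A c m = max m (c + A.foldr (fun a b => max 0 (a + b)) 0) := by
  induction A with
  | nil => intro c m h; simp [pvLoopA]; omega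
  | cons d rest ih =>
      intro c m h
      have hb := foldr_best_nonneg rest
      simp only [pvLoopA, List.foldr_cons]
      rw [ih (c + d) _ (by split_ifs <;> omega)]
      split_ifs <;> omega

-- ===== VERDICT =====
theorem max_people_in_room_spec : Claim_equal_max_people_in_room := by
  intro tcs hd
  unfold Spec_max_people_in_room
  clear hd
  induction tcs with
  | nil => rfl
  | cons c rest ih =>
      obtain ⟨N, X, A⟩ := c
      simp only [max_people_in_room, max_people_in_room_alt, List.map_cons] at ih ⊢
      rw [ih, pvBest_eq_foldr, pvLoopA_eq A X X le_rfl]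
      have := foldr_best_nonneg A
      congr 1
      omega
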